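-- pv_equiv track=rewrite | github.com/edubra/tdah | app/logic/scoring.py | calcular_resultado
-- ===== SOURCE A (Python) =====
-- def calcular_resultado(session):
--     pontuacoes = {
--         "inatento": 0,
--         "hiperativo": 0,
--         "impulsivo": 0,
--         "nenhum": 0     # ✅ Adicione esta linha
--     }
--
--     for k, v in session.items():
--         if k.startswith("resposta_"):
--             pontuacoes[v] += 1
--
--     # Ordenar por pontuação
--     sorted_scores = sorted(pontuacoes.items(), key=lambda x: x[1], reverse=True)
--
--     # Ignorar "nenhum" se houver outros com pontuação
--     sem_neutro = [item for item in sorted_scores if item[0] != "nenhum"]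
--
--     if sem_neutro and sem_neutro[0][1] == sem_neutro[1][1]:
--         return "combinado"
--     elif sem_neutro and sem_neutro[0][1] > 0:
--         return sem_neutro[0][0]
--     else:
--         return "nenhum"
-- ===== SOURCE B (Python) =====
-- def calcular_resultado(session):
--     # Simpler selection: same tally (so invalid answer values still KeyError),
--     # then a direct max scan instead of sort + filter + top-two slice inspection.
--     pontuacoes = {
--         "inatento": 0,
--         "hiperativo": 0,
--         "impulsivo": 0,
--         "nenhum": 0
--     }
--
--     for k, v in session.items():
--         if k.startswith("resposta_"):
--             pontuacoes[v] += 1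
--
--     a = pontuacoes["inatento"]
--     h = pontuacoes["hiperativo"]
--     i = pontuacoes["impulsivo"]
--     m = max(a, h, i)
--     tops = [(c, s) for c, s in (("inatento", a), ("hiperativo", h), ("impulsivo", i)) if s == m]
--     if len(tops) >= 2:
--         return "combinado"
--     return tops[0][0]
-- ===== Notes on version B (the rewrite author's own statement) =====
-- stated objective: simpler
-- what changed: B keeps A's tally loop but replaces the sort-then-filter-then-inspect-top-two selection by a direct max scan over the three non-'nenhum' scores, returning 'combinado' when the max is attained at least twice and otherwise the unique top category; Pre_ excludes the inputs on which A (and B alike) raises KeyError on an answer value outside the four categories.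
import Mathlib
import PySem

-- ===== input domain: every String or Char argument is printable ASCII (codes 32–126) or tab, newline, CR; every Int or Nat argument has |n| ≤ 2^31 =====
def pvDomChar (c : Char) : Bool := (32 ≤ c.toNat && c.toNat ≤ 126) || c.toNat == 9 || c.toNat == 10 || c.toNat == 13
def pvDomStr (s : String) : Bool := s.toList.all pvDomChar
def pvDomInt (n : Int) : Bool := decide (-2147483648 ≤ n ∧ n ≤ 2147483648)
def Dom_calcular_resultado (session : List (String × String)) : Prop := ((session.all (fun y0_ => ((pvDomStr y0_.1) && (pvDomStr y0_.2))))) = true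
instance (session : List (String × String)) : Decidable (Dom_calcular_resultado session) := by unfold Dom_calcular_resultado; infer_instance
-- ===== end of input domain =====

-- B keeps A's tally loop (so invalid answer values still raise KeyError, as A does)
-- but replaces the sort + filter + top-two-slice selection by a direct max scan (objective: simpler).

-- ===== PORT A =====
def calcular_resultado (session : List (String × String)) : String :=
  let pontuacoes : PySem.Dict String Int :=
    PySem.Dict.mk [("inatento", 0), ("hiperativo", 0), ("impulsivo", 0), ("nenhum", 0)]
  -- for k, v in session.items(): if k.startswith("resposta_"): pontuacoes[v] += 1
  -- (Python raises KeyError when v is not already a key; Pre_ excludes those inputs)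
  let pontuacoes := session.foldl
    (fun d kv =>
      if PySem.Str.startswith kv.1 "resposta_" then d.insert kv.2 (d.getD kv.2 0 + 1) else d)
    pontuacoes
  let sorted_scores := PySem.List.sorted pontuacoes.items (fun x => x.2) true
  let sem_neutro := sorted_scores.filter (fun item => decide (item.1 ≠ "nenhum"))
  match sem_neutro with
  | p0 :: p1 :: _ => if p0.2 == p1.2 then "combinado" else if p0.2 > 0 then p0.1 else "nenhum"
  | [p0] => if p0.2 > 0 then p0.1 else "nenhum"   -- Python would raise IndexError here; unreachable (sem_neutro always has 3 items)
  | [] => "nenhum"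

-- ===== PORT B =====
def calcular_resultado_alt (session : List (String × String)) : String :=
  let pontuacoes : PySem.Dict String Int :=
    PySem.Dict.mk [("inatento", 0), ("hiperativo", 0), ("impulsivo", 0), ("nenhum", 0)]
  -- same tally loop as Source B (KeyError on foreign values; Pre_ excludes those inputs)
  let pontuacoes := session.foldl
    (fun d kv =>
      if PySem.Str.startswith kv.1 "resposta_" then d.insert kv.2 (d.getD kv.2 0 + 1) else d)
    pontuacoes
  let a := pontuacoes.getD "inatento" 0    -- keys always present: getD is exact for Source B's d[k]
  let h := pontuacoes.getD "hiperativo" 0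
  let i := pontuacoes.getD "impulsivo" 0
  let m := max (max a h) i
  let tops := ([("inatento", a), ("hiperativo", h), ("impulsivo", i)] : List (String × Int)).filter
    (fun p => p.2 == m)
  if 2 ≤ tops.length then "combinado"
  else (tops.headD ("", 0)).1   -- tops[0][0]; tops is nonempty by construction (m is one of a, h, i)

-- ===== PRECONDITION & SPEC =====
-- Pre_ excludes exactly the inputs where A raises KeyError (a "resposta_" entry whose value is
-- not one of the four categories); B raises KeyError there too.
def Pre_calcular_resultado (session : List (String × String)) : Prop :=
  ∀ p ∈ session, PySem.Str.startswith p.1 "resposta_" = true →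
    p.2 ∈ (["inatento", "hiperativo", "impulsivo", "nenhum"] : List String)
instance (session : List (String × String)) : Decidable (Pre_calcular_resultado session) := by unfold Pre_calcular_resultado; infer_instance

def pvWitness_calcular_resultado : (List (String × String)) :=
  [("resposta_1", "inatento"), ("resposta_2", "inatento"), ("idade", "x")]

def Spec_calcular_resultado (session : List (String × String)) (out : String) : Prop := out = calcular_resultado_alt session
instance (session : List (String × String)) (out : String) : Decidable (Spec_calcular_resultado session out) := by unfold Spec_calcular_resultado; infer_instance

-- ===== CLAIM (what is proved, stated in full; the proofs are below) =====
def Claim_equal_calcular_resultado : Prop := ∀ (session : List (String × String)), Dom_calcular_resultado session → Pre_calcular_resultado session → Spec_calcular_resultado session (calcular_resultado session)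

-- ===== LEMMAS AND PROOFS =====

-- filter drops an insertBy-inserted element the filter rejects, leaving the rest untouched.
theorem filter_insertBy {α : Type} (before : α → α → Bool) (p : α → Bool) (x : α) (s : List α)
    (hx : p x = false) : (PySem.List.insertBy before x s).filter p = s.filter p := by
  induction s with
  | nil => simp [PySem.List.insertBy, List.filter, hx]
  | cons y ys ih =>
    by_cases hb : before x y = true
    · simp [PySem.List.insertBy, hb, List.filter_cons, hx]
    · simp only [PySem.List.insertBy] at ih ⊢
      simp [hb, List.filter_cons, ih]

-- A's tail (sort of the four tallies, drop "nenhum", inspect the top two) agrees with B's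
-- max-scan selection, for any m that is the maximum of the three non-"nenhum" scores.
set_option maxHeartbeats 1000000 in
theorem coreLemma (a h i n m : Int) (ha : 0 ≤ a) (hh : 0 ≤ h) (hi : 0 ≤ i)
    (hma : a ≤ m) (hmh : h ≤ m) (hmi : i ≤ m) (hm : m = a ∨ m = h ∨ m = i) :
    (let sorted_scores := PySem.List.sorted
        ([("inatento", a), ("hiperativo", h), ("impulsivo", i), ("nenhum", n)] : List (String × Int))
        (fun x => x.2) true
     let sem_neutro := sorted_scores.filter (fun item => decide (item.1 ≠ "nenhum"))
     match sem_neutro with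
     | p0 :: p1 :: _ => if p0.2 == p1.2 then "combinado" else if p0.2 > 0 then p0.1 else "nenhum"
     | [p0] => if p0.2 > 0 then p0.1 else "nenhum"
     | [] => "nenhum")
    =
    (let tops := ([("inatento", a), ("hiperativo", h), ("impulsivo", i)] : List (String × Int)).filter
       (fun p => p.2 == m)
     if 2 ≤ tops.length then "combinado" else (tops.headD ("", 0)).1) := by
  simp only [PySem.List.sorted, List.foldl]
  rw [filter_insertBy _ _ _ _ (by simp)]
  by_cases c1 : a < h <;>
  by_cases c2 : a < i <;>
  by_cases c3 : h < i <;>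
  simp [PySem.List.insertBy, List.filter_cons, List.filter_nil, beq_iff_eq, c1, c2, c3] <;>
  split_ifs <;>
  first
    | rfl
    | (rcases hm with hq | hq | hq <;> (try simp only [List.length_cons, List.length_nil] at *) <;> omega)

-- Under Pre_, the tally loop's dict has exactly the four keys, holding the counts of vals.
theorem tallyItems (session : List (String × String)) (hpre : Pre_calcular_resultado session) :
    (session.foldl
      (fun d kv =>
        if PySem.Str.startswith kv.1 "resposta_" then d.insert kv.2 (d.getD kv.2 0 + 1) else d)
      (PySem.Dict.mk [("inatento", 0), ("hiperativo", 0), ("impulsivo", 0), ("nenhum", 0)])).items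
    =
    (let vals := (session.filter (fun kv => PySem.Str.startswith kv.1 "resposta_")).map (fun kv => kv.2)
     [("inatento", (vals.count "inatento" : Int)), ("hiperativo", (vals.count "hiperativo" : Int)),
      ("impulsivo", (vals.count "impulsivo" : Int)), ("nenhum", (vals.count "nenhum" : Int))]) := by
  rw [← List.foldl_filter,
    ← List.foldl_map (f := fun kv : String × String => kv.2)
      (g := fun d v => PySem.Dict.insert d v (PySem.Dict.getD d v 0 + 1))]
  set D0 : PySem.Dict String Int := PySem.Dict.mk [("inatento", 0), ("hiperativo", 0), ("impulsivo", 0), ("nenhum", 0)] with hD0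
  set vals := (session.filter (fun kv => PySem.Str.startswith kv.1 "resposta_")).map (fun kv => kv.2) with hv
  have hmem : ∀ v ∈ vals, v ∈ (["inatento", "hiperativo", "impulsivo", "nenhum"] : List String) := by
    intro v hvmem
    rw [hv] at hvmem
    simp only [List.mem_map, List.mem_filter] at hvmem
    obtain ⟨kv, ⟨hks, hst⟩, rfl⟩ := hvmem
    exact hpre kv hks hst
  have hkeys : (vals.foldl (fun d v => PySem.Dict.insert d v (PySem.Dict.getD d v 0 + 1)) D0).keys
      = ["inatento", "hiperativo", "impulsivo", "nenhum"] := by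
    rw [PySem.Dict.keys_foldl_insert]
    have : D0.keys = ["inatento", "hiperativo", "impulsivo", "nenhum"] := by rw [hD0]; rfl
    rw [this, PySem.Set.update_eq_append_filter]
    have : (PySem.Set.ofList vals).filter
        (fun y => !(PySem.Set.contains (["inatento", "hiperativo", "impulsivo", "nenhum"] : List String) y)) = [] := by
      rw [List.filter_eq_nil_iff]
      intro y hy
      have hyv : y ∈ vals := (PySem.Set.mem_ofList _ _).1 hy
      have h4 := hmem y hyv
      simp only [List.mem_cons, List.not_mem_nil] at h4
      simp
      tauto
    rw [this, List.append_nil]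
  rw [PySem.Dict.items_eq_map_keys _ (by rw [hkeys]; decide) 0, hkeys]
  simp only [List.map, PySem.Dict.getD_foldl_insert_add_one]
  norm_num [hD0]
  decide

-- The same fold, read through getD at each of the three non-"nenhum" keys (for B's side).
theorem tallyGetD (session : List (String × String)) (c : String) :
    (session.foldl
      (fun d kv =>
        if PySem.Str.startswith kv.1 "resposta_" then d.insert kv.2 (d.getD kv.2 0 + 1) else d)
      (PySem.Dict.mk [("inatento", 0), ("hiperativo", 0), ("impulsivo", 0), ("nenhum", 0)])).getD c 0
    =
    (PySem.Dict.mk [("inatento", 0), ("hiperativo", 0), ("impulsivo", 0), ("nenhum", 0)] :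
      PySem.Dict String Int).getD c 0
    + (((session.filter (fun kv => PySem.Str.startswith kv.1 "resposta_")).map (fun kv => kv.2)).count c : Int) := by
  rw [← List.foldl_filter,
    ← List.foldl_map (f := fun kv : String × String => kv.2)
      (g := fun d v => PySem.Dict.insert d v (PySem.Dict.getD d v 0 + 1))]
  exact PySem.Dict.getD_foldl_insert_add_one _ _ _

-- ===== VERDICT (by name: the statement is the Claim_ definition above) =====
theorem calcular_resultado_spec : Claim_equal_calcular_resultado := by
  intro session _ hpre
  show calcular_resultado session = calcular_resultado_alt session
  simp only [calcular_resultado, calcular_resultado_alt]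
  rw [tallyItems session hpre, tallyGetD, tallyGetD, tallyGetD]
  have hz : (PySem.Dict.mk [("inatento", 0), ("hiperativo", 0), ("impulsivo", 0), ("nenhum", 0)] :
      PySem.Dict String Int).getD "inatento" 0 = 0 := by decide
  have hz2 : (PySem.Dict.mk [("inatento", 0), ("hiperativo", 0), ("impulsivo", 0), ("nenhum", 0)] :
      PySem.Dict String Int).getD "hiperativo" 0 = 0 := by decide
  have hz3 : (PySem.Dict.mk [("inatento", 0), ("hiperativo", 0), ("impulsivo", 0), ("nenhum", 0)] :
      PySem.Dict String Int).getD "impulsivo" 0 = 0 := by decide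
  rw [hz, hz2, hz3]
  simp only [zero_add]
  exact coreLemma _ _ _ _ _ (by positivity) (by positivity) (by positivity)
    (le_max_of_le_left (le_max_left _ _)) (le_max_of_le_left (le_max_right _ _)) (le_max_right _ _)
    (by omega)
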